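-- pv_equiv track=rewrite | github.com/jacurick19/AxisAndAllies_Probability_Calculator | AAAWinProbabilities.py | reapCasualities
-- ===== SOURCE A (Python) =====
-- def reapCasualities(oldAr, hitCount):
--     newAr = []
--     for x in oldAr:
--         if hitCount - x >= 0:
--             newAr.append(0)
--             hitCount -= x
--         else:
--             newAr.append(x - hitCount)
--             hitCount = 0
--     return newAr
-- ===== SOURCE B (Python) =====
-- def reapCasualities(oldAr, hitCount):
--     # pass 1: the stream of remaining hits available just BEFORE each unit
--     rems = []
--     for x in oldAr:
--         rems.append(hitCount)
--         hitCount = max(hitCount - x, 0)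
--     # pass 2: surviving strength of each unit given its remaining hits
--     return [max(x - r, 0) for x, r in zip(oldAr, rems)]
-- ===== Notes on version B (the rewrite author's own statement) =====
-- stated objective: alternative
-- what changed: Replaces A's single loop that mutates hitCount while appending casualties with two staged passes: first materialise the stream of remaining hit counts before each unit, then a zip comprehension maps each unit x with its remaining hits r to max(x - r, 0).
import Mathlib
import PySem

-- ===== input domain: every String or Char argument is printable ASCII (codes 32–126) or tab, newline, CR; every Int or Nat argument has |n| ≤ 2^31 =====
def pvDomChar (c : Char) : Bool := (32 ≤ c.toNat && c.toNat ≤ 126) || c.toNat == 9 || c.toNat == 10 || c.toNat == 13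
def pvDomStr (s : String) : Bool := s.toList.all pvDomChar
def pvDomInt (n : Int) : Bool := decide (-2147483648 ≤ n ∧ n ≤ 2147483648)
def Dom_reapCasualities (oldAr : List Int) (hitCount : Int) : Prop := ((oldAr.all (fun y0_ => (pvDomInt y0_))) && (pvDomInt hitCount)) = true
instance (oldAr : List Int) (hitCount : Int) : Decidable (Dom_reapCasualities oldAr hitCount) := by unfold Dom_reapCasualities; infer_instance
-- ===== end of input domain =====

-- B replaces A's single mutating loop by two staged passes (stream of remaining hits, then a zip/map); same O(n) cost.

-- ===== PORT A =====
-- literal port of A's loop: state = (newAr, hitCount), appended at the back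
def reapCasualities (oldAr : List Int) (hitCount : Int) : List Int :=
  (oldAr.foldl
    (fun (s : List Int × Int) x =>
      if s.2 - x ≥ 0 then (s.1 ++ [0], s.2 - x) else (s.1 ++ [x - s.2], 0))
    ([], hitCount)).1

-- ===== PORT B =====
-- pass 1 of Source B: the stream of remaining hits before each unit (loop → structural recursion)
def remsPass : List Int → Int → List Int
  | [], _ => []
  | x :: xs, h => h :: remsPass xs (max (h - x) 0)

-- pass 2 of Source B: the zip comprehension
def reapCasualities_alt (oldAr : List Int) (hitCount : Int) : List Int :=
  List.zipWith (fun x r => max (x - r) 0) oldAr (remsPass oldAr hitCount)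

-- ===== PRECONDITION & SPEC =====
def Spec_reapCasualities (oldAr : List Int) (hitCount : Int) (out : List Int) : Prop := out = reapCasualities_alt oldAr hitCount
instance (oldAr : List Int) (hitCount : Int) (out : List Int) : Decidable (Spec_reapCasualities oldAr hitCount out) := by unfold Spec_reapCasualities; infer_instance

-- ===== CLAIM (what is proved, stated in full; the proofs are below) =====
def Claim_equal_reapCasualities : Prop := ∀ (oldAr : List Int) (hitCount : Int), Dom_reapCasualities oldAr hitCount → Spec_reapCasualities oldAr hitCount (reapCasualities oldAr hitCount)

-- ===== LEMMAS AND PROOFS =====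
theorem reap_foldl_eq (oldAr : List Int) : ∀ (acc : List Int) (h : Int),
    (oldAr.foldl
      (fun (s : List Int × Int) x =>
        if s.2 - x ≥ 0 then (s.1 ++ [0], s.2 - x) else (s.1 ++ [x - s.2], 0))
      (acc, h)).1 = acc ++ reapCasualities_alt oldAr h := by
  induction oldAr with
  | nil => intro acc h; simp [reapCasualities_alt, remsPass]
  | cons x xs ih =>
    intro acc h
    simp only [List.foldl_cons, reapCasualities_alt, remsPass, List.zipWith_cons_cons]
    by_cases hc : h - x ≥ 0
    · rw [if_pos hc, ih]
      have h1 : max (x - h) 0 = 0 := by omega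
      have h2 : max (h - x) 0 = h - x := by omega
      simp [reapCasualities_alt, h1, h2]
    · rw [if_neg hc, ih]
      have h1 : max (x - h) 0 = x - h := by omega
      have h2 : max (h - x) 0 = 0 := by omega
      simp [reapCasualities_alt, h1, h2]

-- ===== VERDICT (by name: the statement is the Claim_ definition above) =====
theorem reapCasualities_spec : Claim_equal_reapCasualities := by
  intro oldAr hitCount _
  unfold Spec_reapCasualities reapCasualities
  simpa using reap_foldl_eq oldAr [] hitCount
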